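-- pv_equiv track=rewrite | github.com/tmerr/aoc | 2023/13/part1.py | is_mirrored_about
-- ===== SOURCE A (Python) =====
-- def is_mirrored_about(seq, i):
--     j = 0
--     while True:
--         left = i-j
--         right = i+j+1
--         if left < 0 or right >= len(seq):
--             break
--         if seq[left] != seq[right]:
--             return False
--         j += 1
--     return True
-- ===== SOURCE B (Python) =====
-- def is_mirrored_about(seq, i):
--     if i < 0:
--         return True
--     left = seq[:i+1][::-1]
--     right = seq[i+1:]
--     return all(a == b for a, b in zip(left, right))
-- ===== Notes on version B (the rewrite author's own statement) =====
-- stated objective: simpler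
-- what changed: Replaces the index-chasing while loop with slicing: build the reversed prefix seq[:i+1] and the suffix seq[i+1:], and compare them pairwise with zip/all (zip truncates at the shorter side, reproducing the boundary break).
import Mathlib
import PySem

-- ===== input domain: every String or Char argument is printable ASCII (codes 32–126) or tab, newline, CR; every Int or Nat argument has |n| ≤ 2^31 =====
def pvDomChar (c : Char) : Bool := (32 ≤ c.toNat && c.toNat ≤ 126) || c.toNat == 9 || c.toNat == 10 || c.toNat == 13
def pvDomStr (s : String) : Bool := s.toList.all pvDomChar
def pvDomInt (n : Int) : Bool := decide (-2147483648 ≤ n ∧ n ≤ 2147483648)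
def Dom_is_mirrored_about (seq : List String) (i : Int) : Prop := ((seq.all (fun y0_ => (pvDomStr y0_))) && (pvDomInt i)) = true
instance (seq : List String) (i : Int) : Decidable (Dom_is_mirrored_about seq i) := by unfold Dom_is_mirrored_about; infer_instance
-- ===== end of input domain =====

-- B replaces A's index-chasing while loop by slicing: compare the reversed prefix with the suffix via zip/all (simpler decomposition).

-- ===== PORT A =====
-- the while loop of A, state j; breaks (returns true) when left < 0 or right ≥ len
def is_mirrored_about_loop (seq : List String) (i : Int) (j : Nat) : Bool :=
  let left := i - (j : Int)
  let right := i + (j : Int) + 1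
  if left < 0 ∨ (seq.length : Int) ≤ right then true
  else if PySem.List.pyGet? seq left ≠ PySem.List.pyGet? seq right then false
  else is_mirrored_about_loop seq i (j + 1)
termination_by (i + 1 - j).toNat
decreasing_by omega

def is_mirrored_about (seq : List String) (i : Int) : Bool :=
  is_mirrored_about_loop seq i 0

-- ===== PORT B =====
def is_mirrored_about_alt (seq : List String) (i : Int) : Bool :=
  if i < 0 then true
  else
    let left := (PySem.List.slice seq none (some (i + 1))).reverse
    let right := PySem.List.slice seq (some (i + 1)) none
    (left.zip right).all (fun p => p.1 == p.2)

-- ===== PRECONDITION & SPEC =====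
def Spec_is_mirrored_about (seq : List String) (i : Int) (out : Bool) : Prop := out = is_mirrored_about_alt seq i
instance (seq : List String) (i : Int) (out : Bool) : Decidable (Spec_is_mirrored_about seq i out) := by unfold Spec_is_mirrored_about; infer_instance

-- ===== CLAIM (what is proved, stated in full; the proofs are below) =====
def Claim_equal_is_mirrored_about : Prop := ∀ (seq : List String) (i : Int), Dom_is_mirrored_about seq i → Spec_is_mirrored_about seq i (is_mirrored_about seq i)

-- ===== LEMMAS AND PROOFS =====

-- A's loop from state j computes the zip/all check on the pairs from index j onward
theorem loop_eq_zip (seq : List String) (n : Nat) : ∀ (k j : Nat), n + 1 - j ≤ k →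
    is_mirrored_about_loop seq (n : Int) j =
      ((((seq.take (n + 1)).reverse.zip (seq.drop (n + 1))).drop j).all (fun p => p.1 == p.2)) := by
  intro k
  induction k with
  | zero =>
    intro j hj
    rw [is_mirrored_about_loop]
    have hlen : (((seq.take (n + 1)).reverse.zip (seq.drop (n + 1)))).length ≤ j := by
      simp [List.length_zip]; omega
    rw [List.drop_eq_nil_of_le hlen, if_pos (by left; omega)]
    simp
  | succ k ih =>
    intro j hj
    rw [is_mirrored_about_loop]
    by_cases hbreak : ((n : Int) - j < 0 ∨ (seq.length : Int) ≤ (n : Int) + j + 1)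
    · have hlen : (((seq.take (n + 1)).reverse.zip (seq.drop (n + 1)))).length ≤ j := by
        simp [List.length_zip]; omega
      rw [List.drop_eq_nil_of_le hlen, if_pos hbreak]
      simp
    · rw [if_neg hbreak]
      push Not at hbreak
      obtain ⟨h1, h2⟩ := hbreak
      have hjn : j ≤ n := by omega
      have hlen : n + 1 + j < seq.length := by omega
      have hjZ : j < (((seq.take (n + 1)).reverse.zip (seq.drop (n + 1)))).length := by
        simp [List.length_zip]; omega
      rw [List.drop_eq_getElem_cons hjZ, List.all_cons]
      have hgetL : ((seq.take (n + 1)).reverse)[j]'(by simp at hjZ ⊢; omega) = seq[n - j]'(by omega) := by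
        rw [List.getElem_reverse, List.getElem_take]
        congr 1
        simp [List.length_take]
        omega
      have hgetR : (seq.drop (n + 1))[j]'(by simp at hjZ ⊢; omega) = seq[n + 1 + j]'(by omega) := by
        rw [List.getElem_drop]
      have hA : PySem.List.pyGet? seq ((n : Int) - j) = some (seq[n - j]'(by omega)) := by
        have h : ((n : Int) - j) = ((n - j : Nat) : Int) := by omega
        rw [h, PySem.List.pyGet?_natCast]
        simp
      have hB : PySem.List.pyGet? seq ((n : Int) + j + 1) = some (seq[n + 1 + j]'(by omega)) := by
        have h : ((n : Int) + j + 1) = ((n + 1 + j : Nat) : Int) := by omega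
        rw [h, PySem.List.pyGet?_natCast]
        simp
      by_cases heq : seq[n - j]'(by omega) = seq[n + 1 + j]'(by omega)
      · rw [if_neg (by simp [hA, hB, heq])]
        rw [ih (j + 1) (by omega)]
        simp [List.getElem_zip, hgetL, hgetR, heq]
      · rw [if_pos (by simp [hA, hB, heq])]
        simp [List.getElem_zip, hgetL, hgetR, heq]

-- ===== VERDICT (by name: the statement is the Claim_ definition above) =====
theorem is_mirrored_about_spec : Claim_equal_is_mirrored_about := by
  intro seq i _
  unfold Spec_is_mirrored_about is_mirrored_about is_mirrored_about_alt
  by_cases hneg : i < 0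
  · rw [if_pos hneg, is_mirrored_about_loop]
    rw [if_pos (by left; simpa using hneg)]
  · rw [if_neg hneg]
    obtain ⟨n, rfl⟩ : ∃ n : Nat, i = (n : Int) := ⟨i.toNat, (Int.toNat_of_nonneg (by omega)).symm⟩
    rw [loop_eq_zip seq n (n + 1) 0 (by omega)]
    rw [show ((n : Int) + 1) = ((n + 1 : Nat) : Int) by push_cast; ring]
    rw [PySem.List.slice_to_natCast, PySem.List.slice_from_natCast]
    simp
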